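-- pv_equiv track=rewrite | github.com/JK0201/Algorithm | 프로그래머스/0/181847. 0 떼기/0 떼기.py | solution
-- ===== SOURCE A (Python) =====
-- def solution(n_str):
--     answer = ''
--     not_zero = False
--
--     for s in n_str:
--         if s != "0":
--             not_zero = True
--
--         if not_zero:
--             answer += s
--
--     return answer
-- ===== SOURCE B (Python) =====
-- def solution(n_str):
--     return n_str.lstrip('0')
-- ===== Notes on version B (the rewrite author's own statement) =====
-- stated objective: idiomatic
-- what changed: Replaces the per-character accumulation under a latching flag with a single stdlib lstrip call that strips the leading zero characters.
import Mathlib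
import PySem

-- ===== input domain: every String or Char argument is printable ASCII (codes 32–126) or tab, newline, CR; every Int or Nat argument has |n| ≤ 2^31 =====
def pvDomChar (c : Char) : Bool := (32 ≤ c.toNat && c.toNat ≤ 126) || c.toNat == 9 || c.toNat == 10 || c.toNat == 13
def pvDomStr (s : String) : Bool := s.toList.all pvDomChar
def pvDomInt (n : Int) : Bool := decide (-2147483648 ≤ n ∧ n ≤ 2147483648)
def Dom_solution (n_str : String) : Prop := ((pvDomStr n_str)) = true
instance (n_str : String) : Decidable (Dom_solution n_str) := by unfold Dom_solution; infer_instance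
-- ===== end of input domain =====

-- B replaces A's per-character accumulation under a latching flag with the idiomatic str.lstrip('0').


-- ===== PORT A =====
-- loop state: (answer, not_zero)
def solution (n_str : String) : String :=
  let st := n_str.toList.foldl (fun (st : List Char × Bool) s =>
    let not_zero := if s ≠ '0' then true else st.2
    let answer := if not_zero then st.1 ++ [s] else st.1
    (answer, not_zero)) ([], false)
  String.mk st.1

-- ===== PORT B =====
-- n_str.lstrip('0'): PySem has no lstrip-with-chars primitive, so the stdlib call is
-- ported directly as dropping the leading '0' characters (exact for this single-char set).
def solution_alt (n_str : String) : String :=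
  String.mk (n_str.toList.dropWhile (fun c => c == '0'))

-- ===== PRECONDITION & SPEC =====
def Spec_solution (n_str : String) (out : String) : Prop := out = solution_alt n_str
instance (n_str : String) (out : String) : Decidable (Spec_solution n_str out) := by unfold Spec_solution; infer_instance

-- ===== CLAIM (what is proved, stated in full; the proofs are below) =====
def Claim_equal_solution : Prop := ∀ (n_str : String), Dom_solution n_str → Spec_solution n_str (solution n_str)

-- ===== LEMMAS AND PROOFS =====
def pvStep (st : List Char × Bool) (s : Char) : List Char × Bool :=
  let not_zero := if s ≠ '0' then true else st.2
  let answer := if not_zero then st.1 ++ [s] else st.1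
  (answer, not_zero)

-- once the flag is set, every remaining character is appended
theorem pvFoldl_true (l : List Char) : ∀ acc : List Char,
    l.foldl pvStep (acc, true) = (acc ++ l, true) := by
  induction l with
  | nil => intro acc; simp
  | cons c t ih => intro acc; simp [pvStep, ih]

-- with the flag unset, the fold drops leading zeros and copies the rest
theorem pvFoldl_false (l : List Char) : ∀ acc : List Char,
    (l.foldl pvStep (acc, false)).1 = acc ++ l.dropWhile (fun c => c == '0') := by
  induction l with
  | nil => intro acc; simp
  | cons c t ih =>
    intro acc
    by_cases h : c = '0'
    · subst h; simpa [pvStep] using ih acc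
    · simp [pvStep, h, pvFoldl_true]

-- ===== VERDICT (by name: the statement is the Claim_ definition above) =====
theorem solution_spec : Claim_equal_solution := by
  intro n_str _
  unfold Spec_solution solution solution_alt
  have := pvFoldl_false n_str.toList []
  simp only [List.nil_append] at this
  simp only [show (fun (st : List Char × Bool) s =>
    let not_zero := if s ≠ '0' then true else st.2
    let answer := if not_zero then st.1 ++ [s] else st.1
    (answer, not_zero)) = pvStep from rfl, this]
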